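-- pv_equiv track=rewrite | github.com/paulcitronico/AO-MS | simplex.py | getValoresFilaColumna
-- ===== SOURCE A (Python) =====
-- def getValoresFilaColumna(matriz,posicion):
--     #se crea una variable que almacena los valores de la fila
--     fila = []
--     #se crea una variable que almacena los valores de la columna
--     columna = []
--     #se recorre la matriz
--     for i in range(len(matriz)):
--         for j in range(len(matriz[i])):
--             #se compara la posicion actual con la posicion del valor menor
--             if i == posicion[0]:
--                 #si la posicion actual es igual a la posicion del valor menor se almacena el valor en la fila
--                 fila.append(matriz[i][j])
--             if j == posicion[1]:
--                 #si la posicion actual es igual a la posicion del valor menor se almacena el valor en la columna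
--                 columna.append(matriz[i][j])
--     return fila,columna
-- ===== SOURCE B (Python) =====
-- def getValoresFilaColumna(matriz, posicion):
--     p0 = posicion[0]
--     p1 = posicion[1]
--     fila = list(matriz[p0]) if 0 <= p0 < len(matriz) else []
--     columna = [row[p1] for row in matriz if 0 <= p1 < len(row)]
--     return fila, columna
-- ===== Notes on version B (the rewrite author's own statement) =====
-- stated objective: alternative
-- what changed: Replaces A's full double scan over every cell (testing each cell against both target indices) with direct indexing: the row is read off by one list index and the column by a single pass over the rows, guarding out-of-range indices; measured ~1.4-1.5x on random inputs, below the 1.5x bar, so no speed is claimed.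
-- outside the precondition, e.g. on getValoresFilaColumna([[], []], ()): A returns ([], []), B raises IndexError; on getValoresFilaColumna([], ()): A returns ([], []), B raises IndexError
import Mathlib
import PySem

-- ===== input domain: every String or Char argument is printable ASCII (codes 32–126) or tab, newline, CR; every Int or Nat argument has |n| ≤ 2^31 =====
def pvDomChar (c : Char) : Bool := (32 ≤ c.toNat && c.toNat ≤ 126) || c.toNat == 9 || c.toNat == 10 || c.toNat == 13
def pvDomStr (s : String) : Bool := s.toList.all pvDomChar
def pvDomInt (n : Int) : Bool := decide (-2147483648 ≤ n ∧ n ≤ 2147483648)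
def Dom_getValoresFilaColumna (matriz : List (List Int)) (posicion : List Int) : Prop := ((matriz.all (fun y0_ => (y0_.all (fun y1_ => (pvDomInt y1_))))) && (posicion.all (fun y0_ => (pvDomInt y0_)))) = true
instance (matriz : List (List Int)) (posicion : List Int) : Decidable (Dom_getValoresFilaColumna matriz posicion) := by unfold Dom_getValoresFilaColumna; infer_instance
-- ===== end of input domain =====

-- B replaces A's double scan over every cell by direct row indexing plus one pass over the rows for the column.

-- ===== PORT A =====
-- posicion[0]/posicion[1] are in range under Pre_ (posicion has ≥ 2 entries), so getD is exact there.
def getValoresFilaColumna (matriz : List (List Int)) (posicion : List Int) : List Int × List Int :=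
  (List.range matriz.length).foldl (fun (acc : List Int × List Int) i =>
    let row := matriz.getD i []
    (List.range row.length).foldl (fun (acc2 : List Int × List Int) j =>
      let acc3 := if (i : Int) = posicion.getD 0 0 then (acc2.1 ++ [row.getD j 0], acc2.2) else acc2
      if (j : Int) = posicion.getD 1 0 then (acc3.1, acc3.2 ++ [row.getD j 0]) else acc3) acc)
    ([], [])

-- ===== PORT B =====
def getValoresFilaColumna_alt (matriz : List (List Int)) (posicion : List Int) : List Int × List Int :=
  let p0 := posicion.getD 0 0
  let p1 := posicion.getD 1 0
  let fila := if 0 ≤ p0 ∧ p0 < (matriz.length : Int) then matriz.getD p0.toNat [] else []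
  let columna := matriz.filterMap (fun row =>
    if 0 ≤ p1 ∧ p1 < (row.length : Int) then some (row.getD p1.toNat 0) else none)
  (fila, columna)

-- ===== PRECONDITION & SPEC =====
-- Pre_ excludes posicion lists with fewer than two entries: there A raises IndexError except in the
-- accidental case that every row of matriz is empty (the loop body never runs and A returns ([], []));
-- B's natural direct indexing raises IndexError on all of them.
def Pre_getValoresFilaColumna (matriz : List (List Int)) (posicion : List Int) : Prop :=
  2 ≤ posicion.length
instance (matriz : List (List Int)) (posicion : List Int) : Decidable (Pre_getValoresFilaColumna matriz posicion) := by unfold Pre_getValoresFilaColumna; infer_instance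

def pvWitness_getValoresFilaColumna : List (List Int) × List Int := ([[1, 2], [3, 4]], [0, 1])

def Spec_getValoresFilaColumna (matriz : List (List Int)) (posicion : List Int) (out : List Int × List Int) : Prop := out = getValoresFilaColumna_alt matriz posicion
instance (matriz : List (List Int)) (posicion : List Int) (out : List Int × List Int) : Decidable (Spec_getValoresFilaColumna matriz posicion out) := by unfold Spec_getValoresFilaColumna; infer_instance

-- ===== CLAIM (what is proved, stated in full; the proofs are below) =====
def Claim_equal_getValoresFilaColumna : Prop := ∀ (matriz : List (List Int)) (posicion : List Int), Dom_getValoresFilaColumna matriz posicion → Pre_getValoresFilaColumna matriz posicion → Spec_getValoresFilaColumna matriz posicion (getValoresFilaColumna matriz posicion)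

-- ===== LEMMAS AND PROOFS =====

lemma filterMap_single (p1 : Int) (row : List Int) :
    List.filterMap (fun x => if 0 ≤ p1 ∧ p1 < (x.length : Int) then some (x.getD p1.toNat 0) else none) [row]
    = (if 0 ≤ p1 ∧ p1 < (row.length : Int) then [row.getD p1.toNat 0] else []) := by
  by_cases h : 0 ≤ p1 ∧ p1 < (row.length : Int) <;> simp [h]

-- one inner pass of A over row (row = matriz[i]) appends the whole row to fila iff i = p0,
-- and at most the single element row[p1] to columna
lemma inner_aux (row : List Int) (i : Nat) (p0 p1 : Int) :
    ∀ m ≤ row.length, ∀ acc : List Int × List Int,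
    (List.range m).foldl (fun (acc2 : List Int × List Int) j =>
      let acc3 := if (i : Int) = p0 then (acc2.1 ++ [row.getD j 0], acc2.2) else acc2
      if (j : Int) = p1 then (acc3.1, acc3.2 ++ [row.getD j 0]) else acc3) acc
    = (acc.1 ++ (if (i : Int) = p0 then row.take m else []),
       acc.2 ++ (if 0 ≤ p1 ∧ p1 < (m : Int) then [row.getD p1.toNat 0] else [])) := by
  intro m
  induction m with
  | zero =>
      intro _ acc
      simp only [List.range_zero, List.foldl_nil, List.take_zero, ite_self]
      rw [if_neg (show ¬(0 ≤ p1 ∧ p1 < ((0 : Nat) : Int)) by omega)]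
      simp
  | succ m ih =>
      intro hm acc
      rw [List.range_succ, List.foldl_append, ih (by omega) acc]
      have hmrow : m < row.length := by omega
      have htake : row.take (m + 1) = row.take m ++ [row.getD m 0] := by
        rw [List.take_add_one]
        simp [List.getD_eq_getElem?_getD, List.getElem?_eq_getElem hmrow]
      simp only [List.foldl_cons, List.foldl_nil]
      by_cases hp1 : (m : Int) = p1
      · have h1 : (0 ≤ p1 ∧ p1 < ((m + 1 : Nat) : Int)) := by omega
        have h2 : ¬ (0 ≤ p1 ∧ p1 < (m : Int)) := by omega
        have h3 : p1.toNat = m := by omega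
        by_cases hp0 : (i : Int) = p0 <;>
          simp [hp0, hp1, h1, h3, htake]
      · by_cases hin : 0 ≤ p1 ∧ p1 < (m : Int)
        · by_cases hp0 : (i : Int) = p0 <;>
            simp [hp0, hp1, hin, htake] <;> omega
        · by_cases hp0 : (i : Int) = p0
          · simp [hp0, hp1, hin, htake]
            omega
          · simp [hp0, hp1, hin, htake]
            rw [if_neg (by omega)]
            simp

-- the outer loop of A, run over the first k rows
lemma outer_aux (matriz : List (List Int)) (p0 p1 : Int) :
    ∀ k ≤ matriz.length, ∀ acc : List Int × List Int,
    (List.range k).foldl (fun (acc : List Int × List Int) i =>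
      let row := matriz.getD i []
      (List.range row.length).foldl (fun (acc2 : List Int × List Int) j =>
        let acc3 := if (i : Int) = p0 then (acc2.1 ++ [row.getD j 0], acc2.2) else acc2
        if (j : Int) = p1 then (acc3.1, acc3.2 ++ [row.getD j 0]) else acc3) acc) acc
    = (acc.1 ++ (if 0 ≤ p0 ∧ p0 < (k : Int) then matriz.getD p0.toNat [] else []),
       acc.2 ++ (matriz.take k).filterMap (fun row =>
         if 0 ≤ p1 ∧ p1 < (row.length : Int) then some (row.getD p1.toNat 0) else none)) := by
  intro k
  induction k with
  | zero =>
      intro _ acc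
      simp only [List.range_zero, List.foldl_nil, List.take_zero, List.filterMap_nil]
      rw [if_neg (show ¬(0 ≤ p0 ∧ p0 < ((0 : Nat) : Int)) by omega)]
      simp
  | succ k ih =>
      intro hk acc
      rw [List.range_succ, List.foldl_append, ih (by omega) acc]
      have hkm : k < matriz.length := by omega
      have htake : matriz.take (k + 1) = matriz.take k ++ [matriz.getD k []] := by
        rw [List.take_add_one]
        simp [List.getD_eq_getElem?_getD, List.getElem?_eq_getElem hkm]
      simp only [List.foldl_cons, List.foldl_nil]
      rw [inner_aux (matriz.getD k []) k p0 p1 (matriz.getD k []).length (le_refl _)]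
      rw [htake, List.filterMap_append, filterMap_single]
      by_cases hp0 : (k : Int) = p0
      · have h1 : (0 ≤ p0 ∧ p0 < ((k + 1 : Nat) : Int)) := by omega
        have h2 : ¬ (0 ≤ p0 ∧ p0 < (k : Int)) := by omega
        have h3 : p0.toNat = k := by omega
        rw [if_neg h2, if_pos h1, if_pos hp0]
        simp [h3, List.take_length]
      · by_cases hin : 0 ≤ p0 ∧ p0 < (k : Int)
        · rw [if_pos hin, if_pos (show 0 ≤ p0 ∧ p0 < ((k + 1 : Nat) : Int) by omega), if_neg hp0]
          simp [List.append_assoc]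
        · rw [if_neg hin, if_neg (show ¬(0 ≤ p0 ∧ p0 < ((k + 1 : Nat) : Int)) by omega), if_neg hp0]
          simp

-- ===== VERDICT (by name: the statement is the Claim_ definition above) =====
theorem getValoresFilaColumna_spec : Claim_equal_getValoresFilaColumna := by
  intro matriz posicion _ _
  unfold Spec_getValoresFilaColumna getValoresFilaColumna getValoresFilaColumna_alt
  rw [outer_aux matriz (posicion.getD 0 0) (posicion.getD 1 0) matriz.length (le_refl _)]
  simp
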